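-- pv_equiv track=rewrite | github.com/iRevivalx/ICT2214-Web-Sec | detect.py | group_php_lines
-- ===== SOURCE A (Python) =====
-- def group_php_lines(cleaned_lines):
--     chunks = []
--     current_chunk = []
--
--     for line in cleaned_lines:
--         line = line.strip()
--
--         if line.startswith("<?php"):
--             if line.endswith("?>"):
--                 current_chunk.append(line)
--                 chunks.append("\n".join(current_chunk))
--                 current_chunk = []
--             else:
--                 current_chunk.append(line)
--         elif line.endswith("?>"):
--             current_chunk.append(line)
--             chunks.append("\n".join(current_chunk))
--             current_chunk = []
--         elif line:
--             current_chunk.append(line)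
--
--     # If there is any remaining content in current_chunk, add it
--     if current_chunk:
--         chunks.append("\n".join(current_chunk))
--
--     return chunks
-- ===== SOURCE B (Python) =====
-- def group_php_lines(cleaned_lines):
--     lines = [s for s in (x.strip() for x in cleaned_lines) if s]
--     chunks = []
--     start = 0
--     for i, s in enumerate(lines):
--         if s.endswith("?>"):
--             chunks.append("\n".join(lines[start:i + 1]))
--             start = i + 1
--     if start < len(lines):
--         chunks.append("\n".join(lines[start:]))
--     return chunks
-- ===== Notes on version B (the rewrite author's own statement) =====
-- stated objective: alternative
-- what changed: B first builds the filtered list of non-empty stripped lines, then emits chunks by tracking boundary indices and joining slices lines[start:i+1], instead of A's per-line branch chain growing a current-chunk buffer; the redundant startswith('<?php') branch disappears.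
import Mathlib
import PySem

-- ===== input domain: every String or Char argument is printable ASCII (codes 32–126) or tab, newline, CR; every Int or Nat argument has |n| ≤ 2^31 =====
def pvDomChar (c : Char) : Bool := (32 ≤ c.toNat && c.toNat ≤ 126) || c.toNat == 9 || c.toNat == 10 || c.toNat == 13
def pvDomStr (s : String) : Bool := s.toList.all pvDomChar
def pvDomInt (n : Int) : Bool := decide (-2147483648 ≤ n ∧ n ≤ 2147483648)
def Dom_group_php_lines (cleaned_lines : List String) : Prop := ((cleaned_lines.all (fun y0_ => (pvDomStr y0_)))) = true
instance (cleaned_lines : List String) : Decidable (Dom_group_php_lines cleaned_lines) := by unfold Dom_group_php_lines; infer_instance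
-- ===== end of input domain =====

-- B groups by tracking boundary indices into a prebuilt filtered list and joining slices,
-- instead of A's per-line branch chain growing a current-chunk buffer (objective: alternative decomposition).

-- ===== PORT A =====
-- the loop body of A (state = (chunks, current_chunk))
def pvStepA (st : List String × List String) (line : String) : List String × List String :=
  let line := PySem.Str.strip line
  if PySem.Str.startswith line "<?php" then
    if PySem.Str.endswith line "?>" then
      (st.1 ++ [PySem.Str.join "\n" (st.2 ++ [line])], [])
    else
      (st.1, st.2 ++ [line])
  else if PySem.Str.endswith line "?>" then
    (st.1 ++ [PySem.Str.join "\n" (st.2 ++ [line])], [])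
  else if line ≠ "" then
    (st.1, st.2 ++ [line])
  else st

def group_php_lines (cleaned_lines : List String) : List String :=
  let st := cleaned_lines.foldl pvStepA ([], [])
  if st.2 ≠ [] then st.1 ++ [PySem.Str.join "\n" st.2] else st.1

-- ===== PORT B =====
-- the loop body of B (state = (chunks, start))
def pvStepB (lines : List String) (st : List String × Int) (p : Int × String) : List String × Int :=
  if PySem.Str.endswith p.2 "?>" then
    (st.1 ++ [PySem.Str.join "\n" (PySem.List.slice lines (some st.2) (some (p.1 + 1)))], p.1 + 1)
  else st

def group_php_lines_alt (cleaned_lines : List String) : List String :=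
  let lines := (cleaned_lines.map PySem.Str.strip).filter (fun s => s != "")
  let st := (PySem.List.enumerate lines 0).foldl (pvStepB lines) ([], 0)
  if st.2 < (lines.length : Int) then
    st.1 ++ [PySem.Str.join "\n" (PySem.List.slice lines (some st.2) none)]
  else st.1

-- ===== PRECONDITION & SPEC =====
def Spec_group_php_lines (cleaned_lines : List String) (out : List String) : Prop := out = group_php_lines_alt cleaned_lines
instance (cleaned_lines : List String) (out : List String) : Decidable (Spec_group_php_lines cleaned_lines out) := by unfold Spec_group_php_lines; infer_instance

-- ===== CLAIM (what is proved, stated in full; the proofs are below) =====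
def Claim_equal_group_php_lines : Prop := ∀ (cleaned_lines : List String), Dom_group_php_lines cleaned_lines → Spec_group_php_lines cleaned_lines (group_php_lines cleaned_lines)

-- ===== LEMMAS AND PROOFS =====

-- the common core step on a (non-empty, stripped) line
def pvStepCore (st : List String × List String) (s : String) : List String × List String :=
  if PySem.Str.endswith s "?>" then
    (st.1 ++ [PySem.Str.join "\n" (st.2 ++ [s])], [])
  else (st.1, st.2 ++ [s])

-- the two final flushes, named so the invariant can be stated without `let`
def pvFinA (st : List String × List String) : List String :=
  if st.2 ≠ [] then st.1 ++ [PySem.Str.join "\n" st.2] else st.1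

def pvFinB (lines : List String) (st : List String × Int) : List String :=
  if st.2 < (lines.length : Int) then
    st.1 ++ [PySem.Str.join "\n" (PySem.List.slice lines (some st.2) none)]
  else st.1

-- A's step is: skip empty stripped lines, otherwise run the core step
lemma pvStepA_eq (st : List String × List String) (line : String) :
    pvStepA st line =
      (if PySem.Str.strip line != "" then pvStepCore st (PySem.Str.strip line) else st) := by
  unfold pvStepA pvStepCore
  by_cases hs : PySem.Str.strip line = ""
  · rw [hs,
        if_neg (by decide : ¬ PySem.Str.startswith "" "<?php" = true),
        if_neg (by decide : ¬ PySem.Str.endswith "" "?>" = true),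
        if_neg (by decide : ¬ ("" != "") = true),
        if_neg (by decide : ¬ ("" : String) ≠ "")]
  · rw [if_pos (by simpa using hs : (PySem.Str.strip line != "") = true)]
    by_cases hp : PySem.Str.startswith (PySem.Str.strip line) "<?php" = true
    · rw [if_pos hp]
    · rw [if_neg hp]
      by_cases he : PySem.Str.endswith (PySem.Str.strip line) "?>" = true
      · simp only [if_pos he]
      · simp only [if_neg he, if_pos hs]

-- the filtered list of non-empty stripped lines
def pvLines (cleaned_lines : List String) : List String :=
  (cleaned_lines.map PySem.Str.strip).filter (fun s => s != "")

lemma pvFoldA_eq (cleaned_lines : List String) (init : List String × List String) :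
    cleaned_lines.foldl pvStepA init = (pvLines cleaned_lines).foldl pvStepCore init := by
  unfold pvLines
  rw [← PySem.List.foldl_if_eq_foldl_filter (p := fun s => s != "") (f := pvStepCore),
      List.foldl_map]
  apply PySem.List.foldl_congr_mem
  intro acc x _
  exact pvStepA_eq acc x

lemma pvTake_succ (lines : List String) (start k : Nat) (s : String) (rest : List String)
    (hsk : start ≤ k) (hd : lines.drop k = s :: rest) :
    (lines.drop start).take (k - start + 1) = (lines.drop start).take (k - start) ++ [s] := by
  have hk : k < lines.length := by
    by_contra h
    rw [List.drop_eq_nil_of_le (by omega)] at hd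
    simp at hd
  have hsplit : lines.drop start = (lines.drop start).take (k - start) ++ (s :: rest) := by
    conv_lhs => rw [← List.take_append_drop (k - start) (lines.drop start)]
    rw [List.drop_drop, show start + (k - start) = k by omega, hd]
  have hlen : ((lines.drop start).take (k - start)).length = k - start := by
    rw [List.length_take, List.length_drop]; omega
  conv_lhs => rw [hsplit]
  rw [List.take_append, hlen]
  simp [hlen]

lemma pvDropSucc (lines : List String) (k : Nat) (s : String) (rest : List String)
    (hd : lines.drop k = s :: rest) : lines.drop (k + 1) = rest := by
  have h : lines.drop (k + 1) = (lines.drop k).drop 1 := by rw [List.drop_drop]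
  rw [h, hd]; rfl

-- loop invariant: B's index fold over the remaining enumerated suffix produces the same
-- final chunk list as A's buffer fold, with current_chunk = lines[start:k]
lemma pvInvariant (lines : List String) :
    ∀ (rest : List String) (k start : Nat) (chunks : List String),
      start ≤ k → lines.drop k = rest →
      pvFinB lines ((PySem.List.enumerate rest (k : Int)).foldl (pvStepB lines) (chunks, (start : Int))) =
      pvFinA (rest.foldl pvStepCore (chunks, (lines.drop start).take (k - start))) := by
  intro rest
  induction rest with
  | nil =>
    intro k start chunks hsk hd
    have hk : lines.length ≤ k := by
      by_contra h
      rw [List.drop_eq_nil_iff] at hd; omega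
    have hcur : (lines.drop start).take (k - start) = lines.drop start := by
      apply List.take_of_length_le
      rw [List.length_drop]; omega
    simp only [PySem.List.enumerate_nil, List.foldl_nil, hcur, pvFinA, pvFinB]
    rw [PySem.List.slice_from_natCast]
    by_cases hlt : start < lines.length
    · have h1 : (start : Int) < (lines.length : Int) := by exact_mod_cast hlt
      have h2 : lines.drop start ≠ [] := by
        rw [ne_eq, List.drop_eq_nil_iff]; omega
      simp [h1, h2]
    · have h1 : ¬ ((start : Int) < (lines.length : Int)) := by
        simp; exact_mod_cast Nat.le_of_not_lt hlt
      have h2 : lines.drop start = [] := by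
        rw [List.drop_eq_nil_iff]; omega
      simp [h1, h2]
  | cons s rest ih =>
    intro k start chunks hsk hd
    have hk : k < lines.length := by
      by_contra h
      rw [List.drop_eq_nil_of_le (by omega)] at hd
      simp at hd
    have hd' : lines.drop (k + 1) = rest := pvDropSucc lines k s rest hd
    simp only [PySem.List.enumerate_cons, List.foldl_cons]
    by_cases he : PySem.Str.endswith s "?>" = true
    · have hstep : pvStepB lines (chunks, (start : Int)) ((k : Int), s) =
          (chunks ++ [PySem.Str.join "\n" (PySem.List.slice lines (some (start : Int)) (some ((k : Int) + 1)))], (k : Int) + 1) := by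
        simp only [pvStepB]; rw [if_pos he]
      have hslice : PySem.List.slice lines (some (start : Int)) (some ((k : Int) + 1)) =
          (lines.drop start).take (k - start) ++ [s] := by
        rw [show ((k : Int) + 1) = ((k + 1 : Nat) : Int) by push_cast; ring, PySem.List.slice_natCast,
            show k + 1 - start = k - start + 1 by omega]
        exact pvTake_succ lines start k s rest hsk hd
      rw [hstep, hslice, show ((k : Int) + 1) = ((k + 1 : Nat) : Int) by push_cast; ring]
      rw [ih (k + 1) (k + 1) _ (le_refl _) hd']
      have hcore : pvStepCore (chunks, (lines.drop start).take (k - start)) s =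
          (chunks ++ [PySem.Str.join "\n" ((lines.drop start).take (k - start) ++ [s])], []) := by
        simp only [pvStepCore]; rw [if_pos he]
      rw [hcore]
      simp
    · have hstep : pvStepB lines (chunks, (start : Int)) ((k : Int), s) = (chunks, (start : Int)) := by
        simp only [pvStepB]; rw [if_neg he]
      rw [hstep, show ((k : Int) + 1) = ((k + 1 : Nat) : Int) by push_cast; ring]
      rw [ih (k + 1) start _ (by omega) hd']
      have hcore : pvStepCore (chunks, (lines.drop start).take (k - start)) s =
          (chunks, (lines.drop start).take (k - start) ++ [s]) := by
        simp only [pvStepCore]; rw [if_neg he]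
      rw [hcore, show k + 1 - start = k - start + 1 by omega,
          pvTake_succ lines start k s rest hsk hd]

-- ===== VERDICT (by name: the statement is the Claim_ definition above) =====
theorem group_php_lines_spec : Claim_equal_group_php_lines := by
  intro cleaned_lines _
  show pvFinA (cleaned_lines.foldl pvStepA ([], [])) =
       pvFinB (pvLines cleaned_lines)
         ((PySem.List.enumerate (pvLines cleaned_lines) 0).foldl (pvStepB (pvLines cleaned_lines)) ([], 0))
  rw [pvFoldA_eq]
  have h := pvInvariant (pvLines cleaned_lines) (pvLines cleaned_lines) 0 0 [] (le_refl 0) (by simp)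
  simp only [List.drop_zero, Nat.sub_self, List.take_zero, Nat.cast_zero] at h
  exact h.symm
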